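-- pv_equiv track=rewrite | github.com/one-for-all/Algorithms | part1/week6-hash-tables/4sum/4sum.py | four_sum_fast
-- ===== SOURCE A (Python) =====
-- def four_sum_fast(a):
--     N = len(a)
--
--     sums = {}
--     for i in range(N):
--         i_sums = {}  # tmp dict for i row
--         for j in range(i+1, N):
--             sum = a[i] + a[j]
--
--             # Test with existing indices
--             if sum not in i_sums:
--                 if sum in sums:
--                     for tu in sums[sum]:
--                         if len(set(tu).intersection((i, j))) == 0:
--                             return True
--
--             # Add sum->j to tmp dict for i row
--             if sum not in i_sums:
--                 i_sums[sum] = set()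
--             i_sums[sum].add((i, j))
--
--         # Add i_sums to sums
--         for sum in i_sums:
--             if sum not in sums:
--                 sums[sum] = set()
--             sums[sum].update(i_sums[sum])
-- ===== SOURCE B (Python) =====
-- def four_sum_fast(a):
--     # Brute force: scan every pair (i, j) against every pair (k, l); return True
--     # on the first disjoint pair of pairs with equal sums.  Falls through
--     # (returning None) when none exists, like the original.
--     n = len(a)
--     for i in range(n):
--         for j in range(i + 1, n):
--             for k in range(n):
--                 for l in range(k + 1, n):
--                     if k != i and k != j and l != i and l != j and a[i] + a[j] == a[k] + a[l]:
--                         return True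
-- ===== Notes on version B (the rewrite author's own statement) =====
-- stated objective: simpler
-- what changed: Replaced the hash-table of pair-sets (per-row temporary dict merged into a global sum index with a subtle skip-on-repeated-sum rule) by a direct quadruple loop over all pairs of index pairs, returning True on the first disjoint equal-sum pair and falling through to None otherwise.
import Mathlib
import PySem

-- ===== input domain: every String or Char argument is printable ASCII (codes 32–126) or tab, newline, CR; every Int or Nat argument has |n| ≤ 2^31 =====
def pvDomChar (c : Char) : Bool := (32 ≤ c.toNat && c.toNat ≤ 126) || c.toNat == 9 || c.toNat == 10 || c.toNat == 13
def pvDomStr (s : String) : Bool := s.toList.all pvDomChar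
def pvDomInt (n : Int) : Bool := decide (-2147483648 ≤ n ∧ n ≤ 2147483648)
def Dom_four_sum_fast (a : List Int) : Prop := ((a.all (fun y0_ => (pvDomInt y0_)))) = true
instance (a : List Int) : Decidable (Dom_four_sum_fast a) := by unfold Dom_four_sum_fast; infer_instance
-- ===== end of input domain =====

-- B replaces A's hash-table of pair-sets by a plain quadruple loop over all pairs of
-- index pairs (simpler, not faster); both return some true or fall through to none.

-- ===== PORT A =====
-- 'for tu in sums[sum]: if len(set(tu).intersection((i, j))) == 0: return True'.
-- Iterating the Python set is exact here: the loop's result (found / not found) cannot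
-- depend on the iteration order.
def fsTuLoop (i j : Int) : List (Int × Int) → Bool
  | [] => false
  | tu :: rest =>
    if PySem.Set.len (PySem.Set.inter (PySem.Set.ofList [tu.1, tu.2]) [i, j]) = 0 then true
    else fsTuLoop i j rest

-- 'for j in range(i+1, N)': a[i], a[j] via pyGetD (exact: 0 ≤ i < j < N are in range).
def fsJLoop (a : List Int) (sums : PySem.Dict Int (PySem.Set (Int × Int))) (i : Int)
    (iSums : PySem.Dict Int (PySem.Set (Int × Int))) :
    List Int → Option (PySem.Dict Int (PySem.Set (Int × Int)))
  | [] => some iSums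
  | j :: js =>
    let s := PySem.List.pyGetD a i 0 + PySem.List.pyGetD a j 0
    -- 'if sum not in i_sums: if sum in sums: for tu in sums[sum]: … return True'
    if !(iSums.contains s) && sums.contains s && fsTuLoop i j (sums.getD s PySem.Set.empty) then
      none  -- 'return True'
    else
      -- 'if sum not in i_sums: i_sums[sum] = set()' then 'i_sums[sum].add((i, j))'
      let iSums1 := if !(iSums.contains s) then iSums.insert s PySem.Set.empty else iSums
      fsJLoop a sums i (iSums1.modify s PySem.Set.empty (fun st => PySem.Set.add st (i, j))) js

-- 'for sum in i_sums: if sum not in sums: sums[sum] = set(); sums[sum].update(i_sums[sum])'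
def fsMergeLoop (sums : PySem.Dict Int (PySem.Set (Int × Int))) :
    List (Int × PySem.Set (Int × Int)) → PySem.Dict Int (PySem.Set (Int × Int))
  | [] => sums
  | (s, st) :: rest =>
    let sums1 := if !(sums.contains s) then sums.insert s PySem.Set.empty else sums
    fsMergeLoop (sums1.modify s PySem.Set.empty (fun cur => PySem.Set.update cur st)) rest

-- 'for i in range(N)'; falls off the end with no return: None.
def fsILoop (a : List Int) (n : Int) (sums : PySem.Dict Int (PySem.Set (Int × Int))) :
    List Int → Option Bool
  | [] => none
  | i :: is =>
    match fsJLoop a sums i PySem.Dict.empty (PySem.List.pyRange (i + 1) n 1) with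
    | none => some true
    | some iSums => fsILoop a n (fsMergeLoop sums iSums.items) is

def four_sum_fast (a : List Int) : Option Bool :=
  fsILoop a (a.length : Int) PySem.Dict.empty (PySem.List.pyRange 0 (a.length : Int) 1)

-- ===== PORT B =====
-- Source B: four nested for-loops with 'return True' on the first hit ported as short-circuit
-- List.any over the same ranges; no trailing return gives None.
def four_sum_fast_alt (a : List Int) : Option Bool :=
  let n : Int := (a.length : Int)
  if (PySem.List.pyRange 0 n 1).any (fun i =>
      (PySem.List.pyRange (i + 1) n 1).any (fun j =>
        (PySem.List.pyRange 0 n 1).any (fun k =>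
          (PySem.List.pyRange (k + 1) n 1).any (fun l =>
            decide (k ≠ i) && decide (k ≠ j) && decide (l ≠ i) && decide (l ≠ j) &&
            decide (PySem.List.pyGetD a i 0 + PySem.List.pyGetD a j 0 =
                    PySem.List.pyGetD a k 0 + PySem.List.pyGetD a l 0)))))
  then some true else none

-- ===== PRECONDITION & SPEC =====
def Spec_four_sum_fast (a : List Int) (out : Option Bool) : Prop := out = four_sum_fast_alt a
instance (a : List Int) (out : Option Bool) : Decidable (Spec_four_sum_fast a out) := by unfold Spec_four_sum_fast; infer_instance

-- ===== CLAIM (what is proved, stated in full; the proofs are below) =====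
def Claim_equal_four_sum_fast : Prop := ∀ (a : List Int), Dom_four_sum_fast a → Spec_four_sum_fast a (four_sum_fast a)

-- ===== LEMMAS AND PROOFS =====

-- The common existence predicate: two disjoint index pairs with equal sums.
def fsGood (a : List Int) (p q : Int) : Prop := 0 ≤ p ∧ p < q ∧ q < (a.length : Int)

def fsSum (a : List Int) (p q : Int) : Int := PySem.List.pyGetD a p 0 + PySem.List.pyGetD a q 0

def fsW (a : List Int) : Prop :=
  ∃ p q r s : Int, fsGood a p q ∧ fsGood a r s ∧
    r ≠ p ∧ r ≠ q ∧ s ≠ p ∧ s ≠ q ∧ fsSum a p q = fsSum a r s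

-- every stored pair is a valid pair filed under its own sum
def fsSound (a : List Int) (d : PySem.Dict Int (PySem.Set (Int × Int))) : Prop :=
  ∀ s tu, tu ∈ d.getD s PySem.Set.empty → fsGood a tu.1 tu.2 ∧ fsSum a tu.1 tu.2 = s

-- every valid pair from a row below i0 is filed under its sum
def fsCompl (a : List Int) (d : PySem.Dict Int (PySem.Set (Int × Int))) (i0 : Int) : Prop :=
  ∀ p q, fsGood a p q → p < i0 → (p, q) ∈ d.getD (fsSum a p q) PySem.Set.empty

-- the inner-check condition is exactly disjointness
theorem fsCond_iff (i j x y : Int) :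
    PySem.Set.len (PySem.Set.inter (PySem.Set.ofList [x, y]) [i, j]) = 0 ↔
      (x ≠ i ∧ x ≠ j ∧ y ≠ i ∧ y ≠ j) := by
  rw [PySem.Set.len_eq]
  rw [show ((List.length (PySem.Set.inter (PySem.Set.ofList [x, y]) [i, j]) : Int) = 0 ↔
      PySem.Set.inter (PySem.Set.ofList [x, y]) [i, j] = []) by simp [List.length_eq_zero_iff]]
  rw [List.eq_nil_iff_forall_not_mem]
  constructor
  · intro h
    refine ⟨fun e => h x ?_, fun e => h x ?_, fun e => h y ?_, fun e => h y ?_⟩ <;>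
      rw [PySem.Set.mem_inter] <;> simp [PySem.Set.mem_ofList, e]
  · rintro ⟨h1, h2, h3, h4⟩ z hz
    rw [PySem.Set.mem_inter, PySem.Set.mem_ofList] at hz
    rcases hz with ⟨hz1, hz2⟩
    simp at hz1 hz2
    rcases hz1 with rfl | rfl <;> rcases hz2 with rfl | rfl <;> simp_all

theorem fsTuLoop_true_iff (i j : Int) (tus : List (Int × Int)) :
    fsTuLoop i j tus = true ↔ ∃ tu ∈ tus, tu.1 ≠ i ∧ tu.1 ≠ j ∧ tu.2 ≠ i ∧ tu.2 ≠ j := by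
  induction tus with
  | nil => simp [fsTuLoop]
  | cons tu rest ih =>
    simp only [fsTuLoop]
    split
    · rename_i h
      rw [fsCond_iff] at h
      simp only [true_iff]
      exact ⟨tu, List.mem_cons_self, h⟩
    · rename_i h
      rw [fsCond_iff] at h
      rw [ih]
      constructor
      · rintro ⟨tu', htu', hd⟩; exact ⟨tu', List.mem_cons_of_mem _ htu', hd⟩
      · rintro ⟨tu', htu', hd⟩
        rcases List.mem_cons.1 htu' with rfl | hm
        · exact absurd hd h
        · exact ⟨tu', hm, hd⟩

theorem fsContains_false_getD (d : PySem.Dict Int (PySem.Set (Int × Int))) (s : Int)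
    (h : d.contains s = false) : d.getD s PySem.Set.empty = PySem.Set.empty := by
  have := (PySem.Dict.get?_eq_none_iff_contains d s).2 h
  show (d.get? s).getD _ = _
  rw [this]; rfl

-- jLoop only grows the row dict

-- the common 'setdefault-and-modify' step, characterised on getD / contains / keys
theorem fsStep_getD (d : PySem.Dict Int (PySem.Set (Int × Int))) (s0 s : Int)
    (f : PySem.Set (Int × Int) → PySem.Set (Int × Int)) :
    ((if !(d.contains s0) then d.insert s0 PySem.Set.empty else d).modify s0 PySem.Set.empty f).getD
        s PySem.Set.empty =
      if s = s0 then f (d.getD s0 PySem.Set.empty) else d.getD s PySem.Set.empty := by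
  rw [PySem.Dict.getD_modify]
  by_cases hc : d.contains s0 = true
  · simp [hc]
  · simp only [Bool.not_eq_true] at hc
    rw [fsContains_false_getD d s0 hc]
    simp only [hc, Bool.not_false, if_true]
    split
    · rename_i he; subst he
      congr 1
      show ((d.insert s _).get? s).getD _ = _
      rw [PySem.Dict.get?_insert_self]; rfl
    · rename_i he
      show ((d.insert s0 _).get? s).getD _ = _
      rw [PySem.Dict.get?_insert_of_ne _ _ he]; rfl

theorem fsStep_contains (d : PySem.Dict Int (PySem.Set (Int × Int))) (s0 s : Int)
    (f : PySem.Set (Int × Int) → PySem.Set (Int × Int)) :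
    ((if !(d.contains s0) then d.insert s0 PySem.Set.empty else d).modify s0 PySem.Set.empty f).contains s =
      (s == s0 || d.contains s) := by
  rw [PySem.Dict.contains_modify]
  by_cases hc : d.contains s0 = true
  · simp [hc]
  · simp only [Bool.not_eq_true] at hc
    simp only [hc, Bool.not_false, if_true, PySem.Dict.contains_insert]
    cases (s == s0) <;> simp

theorem fsStep_nodup (d : PySem.Dict Int (PySem.Set (Int × Int))) (s0 : Int)
    (f : PySem.Set (Int × Int) → PySem.Set (Int × Int)) (h : d.keys.Nodup) :
    ((if !(d.contains s0) then d.insert s0 PySem.Set.empty else d).modify s0 PySem.Set.empty f).keys.Nodup := by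
  have keys_ins : ∀ (e : PySem.Dict Int (PySem.Set (Int × Int))) (k : Int) (v : PySem.Set (Int × Int)),
      e.keys.Nodup → (e.insert k v).keys.Nodup := by
    intro e k v he
    by_cases hc : e.contains k = true
    · have : (e.insert k v).keys = e.keys := by
        show ((e.insert k v).items.map (·.1)) = (e.items.map (·.1))
        rw [PySem.Dict.items_insert_of_contains _ _ hc, List.map_map]
        apply List.map_congr_left
        intro p _
        by_cases hp : p.1 = k
        · simp [hp]
        · simp [hp]
      rw [this]; exact he
    · simp only [Bool.not_eq_true] at hc
      have : (e.insert k v).keys = e.keys ++ [k] := by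
        show ((e.insert k v).items.map (·.1)) = _
        rw [PySem.Dict.items_insert_of_not_contains _ _ hc]
        simp [PySem.Dict.keys]
      rw [this]
      rw [List.nodup_append]
      refine ⟨he, List.nodup_singleton _, ?_⟩
      intro x hx y hy
      rw [List.mem_singleton] at hy
      subst hy
      intro hxk
      subst hxk
      rw [PySem.Dict.contains_eq_decide_mem_keys] at hc
      simp at hc; exact hc hx
  have h1 : (if !(d.contains s0) then d.insert s0 PySem.Set.empty else d).keys.Nodup := by
    split
    · exact keys_ins d s0 _ h
    · exact h
  set e := (if !(d.contains s0) then d.insert s0 PySem.Set.empty else d) with he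
  rw [PySem.Dict.keys_modify]
  exact keys_ins e s0 _ h1


theorem fsJLoop_extends (a : List Int) (sums : PySem.Dict Int (PySem.Set (Int × Int))) (i : Int) :
    ∀ (js : List Int) (iSums out : PySem.Dict Int (PySem.Set (Int × Int))),
      fsJLoop a sums i iSums js = some out →
      ∀ s x, x ∈ iSums.getD s PySem.Set.empty → x ∈ out.getD s PySem.Set.empty := by
  intro js
  induction js with
  | nil =>
    intro iSums out h s x hx
    simp only [fsJLoop, Option.some.injEq] at h
    rw [← h]; exact hx
  | cons j js ih =>
    intro iSums out h s x hx
    simp only [fsJLoop] at h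
    split at h
    · exact absurd h (by simp)
    · apply ih _ _ h
      rw [fsStep_getD]
      split
      · rename_i he
        rw [he] at hx
        rw [PySem.Set.mem_add]; left; exact hx
      · exact hx

-- every scanned (i, j) ends up filed in the row dict
theorem fsJLoop_row_compl (a : List Int) (sums : PySem.Dict Int (PySem.Set (Int × Int))) (i : Int) :
    ∀ (js : List Int) (iSums out : PySem.Dict Int (PySem.Set (Int × Int))),
      fsJLoop a sums i iSums js = some out →
      ∀ j ∈ js, (i, j) ∈ out.getD (fsSum a i j) PySem.Set.empty := by
  intro js
  induction js with
  | nil => intro iSums out h j hj; exact absurd hj (List.not_mem_nil)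
  | cons j0 js ih =>
    intro iSums out h j hj
    simp only [fsJLoop] at h
    split at h
    · exact absurd h (by simp)
    · rcases List.mem_cons.1 hj with rfl | hm
      · apply fsJLoop_extends a sums i js _ _ h
        rw [fsStep_getD,
          if_pos (show fsSum a i j = PySem.List.pyGetD a i 0 + PySem.List.pyGetD a j 0 from rfl)]
        rw [PySem.Set.mem_add]; right; rfl
      · exact ih _ _ h j hm

theorem fsJLoop_sound (a : List Int) (sums : PySem.Dict Int (PySem.Set (Int × Int))) (i : Int) :
    ∀ (js : List Int) (iSums out : PySem.Dict Int (PySem.Set (Int × Int))),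
      fsSound a iSums → (∀ j ∈ js, 0 ≤ i ∧ i < j ∧ j < (a.length : Int)) →
      fsJLoop a sums i iSums js = some out → fsSound a out := by
  intro js
  induction js with
  | nil =>
    intro iSums out hS hb h
    simp only [fsJLoop, Option.some.injEq] at h
    rw [← h]; exact hS
  | cons j0 js ih =>
    intro iSums out hS hb h
    simp only [fsJLoop] at h
    split at h
    · exact absurd h (by simp)
    · refine ih _ _ ?_ (fun j hj => hb j (List.mem_cons_of_mem _ hj)) h
      intro s tu htu
      rw [fsStep_getD] at htu
      split at htu
      · rename_i he
        rw [PySem.Set.mem_add] at htu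
        rcases htu with htu | rfl
        · exact hS s tu (by rw [he]; exact htu) |>.imp id (fun hh => hh)
        · rcases hb j0 List.mem_cons_self with ⟨h1, h2, h3⟩
          exact ⟨⟨h1, h2, h3⟩, by rw [he]; rfl⟩
      · exact hS s tu htu

theorem fsJLoop_nodup (a : List Int) (sums : PySem.Dict Int (PySem.Set (Int × Int))) (i : Int) :
    ∀ (js : List Int) (iSums out : PySem.Dict Int (PySem.Set (Int × Int))),
      iSums.keys.Nodup → fsJLoop a sums i iSums js = some out → out.keys.Nodup := by
  intro js
  induction js with
  | nil =>
    intro iSums out hn h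
    simp only [fsJLoop, Option.some.injEq] at h
    rw [← h]; exact hn
  | cons j0 js ih =>
    intro iSums out hn h
    simp only [fsJLoop] at h
    split at h
    · exact absurd h (by simp)
    · exact ih _ _ (fsStep_nodup _ _ _ hn) h

-- 'return True' is sound: it really found two disjoint valid pairs of equal sum
theorem fsJLoop_none_sound (a : List Int) (sums : PySem.Dict Int (PySem.Set (Int × Int))) (i : Int)
    (hs : fsSound a sums) :
    ∀ (js : List Int) (iSums : PySem.Dict Int (PySem.Set (Int × Int))),
      (∀ j ∈ js, 0 ≤ i ∧ i < j ∧ j < (a.length : Int)) →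
      fsJLoop a sums i iSums js = none → fsW a := by
  intro js
  induction js with
  | nil => intro iSums hb h; exact absurd h (by simp [fsJLoop])
  | cons j0 js ih =>
    intro iSums hb h
    simp only [fsJLoop] at h
    split at h
    · rename_i hcond
      rcases Bool.and_eq_true_iff.1 hcond with ⟨h12, htu⟩
      rw [fsTuLoop_true_iff] at htu
      rcases htu with ⟨tu, htus, hd1, hd2, hd3, hd4⟩
      rcases hs _ tu htus with ⟨hg, hsum⟩
      rcases hb j0 List.mem_cons_self with ⟨h1, h2, h3⟩
      exact ⟨tu.1, tu.2, i, j0, hg, ⟨h1, h2, h3⟩, Ne.symm hd1, Ne.symm hd3, Ne.symm hd2, Ne.symm hd4, by rw [hsum]; rfl⟩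
    · exact ih _ (fun j hj => hb j (List.mem_cons_of_mem _ hj)) h

-- the row scan is complete: no missed witness against earlier rows
theorem fsJLoop_complete (a : List Int) (sums : PySem.Dict Int (PySem.Set (Int × Int))) (i : Int)
    (hc : fsCompl a sums i) :
    ∀ (m : Nat) (j0 : Int) (iSums out : PySem.Dict Int (PySem.Set (Int × Int))),
      ((a.length : Int) - j0).toNat ≤ m → i < j0 →
      fsJLoop a sums i iSums (PySem.List.pyRange j0 (a.length : Int) 1) = some out →
      ∀ p q j, fsGood a p q → p < i → j0 ≤ j → j < (a.length : Int) →
        q ≠ i → j ≠ p → j ≠ q → fsSum a p q = fsSum a i j →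
        iSums.contains (fsSum a i j) = false → False := by
  intro m
  induction m with
  | zero =>
    intro j0 iSums out hm hij h p q j hg hpi hj0j hjn hqi hjp hjq hsum hco
    omega
  | succ m ih =>
    intro j0 iSums out hm hij h p q j hg hpi hj0j hjn hqi hjp hjq hsum hco
    by_cases hn : j0 < (a.length : Int)
    · rw [PySem.List.pyRange_one_cons hn] at h
      simp only [fsJLoop] at h
      split at h
      · exact absurd h (by simp)
      · rename_i hcond
        by_cases hA : iSums.contains (PySem.List.pyGetD a i 0 + PySem.List.pyGetD a j0 0) = true
        · -- skip case: the sum already occurred in this row before column j0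
          by_cases hjj : j = j0
          · subst hjj
            exact absurd hco (by simp [fsSum, hA])
          · refine ih (j0 + 1) _ out (by omega) (by omega) h p q j hg hpi (by omega) hjn hqi hjp hjq hsum ?_
            rw [fsStep_contains]
            by_cases hss : fsSum a i j = PySem.List.pyGetD a i 0 + PySem.List.pyGetD a j0 0
            · exact absurd hco (by rw [hss, hA]; simp)
            · simp only [hco, Bool.or_false]
              simp [hss]
        · -- check ran at column j0 and found nothing
          simp only [Bool.not_eq_true] at hA
          have noDisj : ∀ p' q' : Int, fsGood a p' q' → p' < i → p' ≠ j0 → q' ≠ i → q' ≠ j0 →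
              fsSum a p' q' = PySem.List.pyGetD a i 0 + PySem.List.pyGetD a j0 0 → False := by
            intro p' q' hg' hlt hp'j0 hq'i hq'j0 hsum'
            have hmem := hc p' q' hg' hlt
            rw [hsum'] at hmem
            by_cases hsc : sums.contains (PySem.List.pyGetD a i 0 + PySem.List.pyGetD a j0 0) = true
            · have htu : fsTuLoop i j0
                  (sums.getD (PySem.List.pyGetD a i 0 + PySem.List.pyGetD a j0 0) PySem.Set.empty) = false := by
                cases htub : fsTuLoop i j0
                    (sums.getD (PySem.List.pyGetD a i 0 + PySem.List.pyGetD a j0 0) PySem.Set.empty)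
                · rfl
                · exact absurd (by rw [hA, hsc, htub]; rfl) hcond
              rw [Bool.eq_false_iff, Ne, fsTuLoop_true_iff] at htu
              exact htu ⟨(p', q'), hmem, by omega, hp'j0, hq'i, hq'j0⟩
            · simp only [Bool.not_eq_true] at hsc
              rw [fsContains_false_getD _ _ hsc] at hmem
              exact absurd hmem (List.not_mem_nil)
          by_cases hjj : j = j0
          · subst hjj
            exact noDisj p q hg hpi (by omega) hqi (Ne.symm hjq) hsum
          · by_cases hss : fsSum a i j = PySem.List.pyGetD a i 0 + PySem.List.pyGetD a j0 0
            · -- same sum reappears at a later column j: move the witness to column j0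
              have hvj : PySem.List.pyGetD a j 0 = PySem.List.pyGetD a j0 0 := by
                simp only [fsSum] at hss; omega
              by_cases hqj0 : q = j0
              · subst hqj0
                have hvp : PySem.List.pyGetD a p 0 = PySem.List.pyGetD a i 0 := by
                  simp only [fsSum] at hsum hss; omega
                refine noDisj p j ⟨hg.1, by omega, hjn⟩ hpi (by omega) (by omega) (by omega) ?_
                simp only [fsSum]; omega
              · refine noDisj p q hg hpi (by omega) hqi hqj0 ?_
                simp only [fsSum] at hsum hss ⊢; omega
            · refine ih (j0 + 1) _ out (by omega) (by omega) h p q j hg hpi (by omega) hjn hqi hjp hjq hsum ?_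
              rw [fsStep_contains]
              simp only [hco, Bool.or_false]
              simp [hss]
    · rw [PySem.List.pyRange_one_eq_nil (by omega)] at h
      omega

-- merge lemmas
theorem fsMergeLoop_mono (s : Int) (x : Int × Int) :
    ∀ (l : List (Int × PySem.Set (Int × Int))) (sums : PySem.Dict Int (PySem.Set (Int × Int))),
      x ∈ sums.getD s PySem.Set.empty → x ∈ (fsMergeLoop sums l).getD s PySem.Set.empty := by
  intro l
  induction l with
  | nil => intro sums hx; exact hx
  | cons hd rest ih =>
    rcases hd with ⟨s1, st1⟩
    intro sums hx
    apply ih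
    rw [fsStep_getD]
    split
    · rename_i he
      rw [he] at hx
      rw [PySem.Set.mem_update]; left; exact hx
    · exact hx

theorem fsMergeLoop_covers (s : Int) (x : Int × Int) :
    ∀ (l : List (Int × PySem.Set (Int × Int))) (sums : PySem.Dict Int (PySem.Set (Int × Int)))
      (st : PySem.Set (Int × Int)), (s, st) ∈ l → x ∈ st →
      x ∈ (fsMergeLoop sums l).getD s PySem.Set.empty := by
  intro l
  induction l with
  | nil => intro sums st h; exact absurd h (List.not_mem_nil)
  | cons hd rest ih =>
    rcases hd with ⟨s1, st1⟩
    intro sums st hmem hx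
    rcases List.mem_cons.1 hmem with heq | hm
    · rcases heq with ⟨rfl, rfl⟩
      simp only [fsMergeLoop]
      apply fsMergeLoop_mono
      rw [fsStep_getD, if_pos rfl]
      rw [PySem.Set.mem_update]; right; exact hx
    · exact ih _ st hm hx

theorem fsMergeLoop_sound (a : List Int) :
    ∀ (l : List (Int × PySem.Set (Int × Int))) (sums : PySem.Dict Int (PySem.Set (Int × Int))),
      fsSound a sums →
      (∀ s st, (s, st) ∈ l → ∀ tu ∈ st, fsGood a tu.1 tu.2 ∧ fsSum a tu.1 tu.2 = s) →
      fsSound a (fsMergeLoop sums l) := by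
  intro l
  induction l with
  | nil => intro sums hS _; exact hS
  | cons hd rest ih =>
    rcases hd with ⟨s1, st1⟩
    intro sums hS hl
    refine ih _ ?_ (fun s st hm => hl s st (List.mem_cons_of_mem _ hm))
    intro s tu htu
    rw [fsStep_getD] at htu
    split at htu
    · rename_i he
      rw [PySem.Set.mem_update] at htu
      rcases htu with htu | htu
      · rcases hS s1 tu htu with ⟨h1, h2⟩
        exact ⟨h1, by rw [h2, he]⟩
      · rcases hl s1 st1 List.mem_cons_self tu htu with ⟨h1, h2⟩
        exact ⟨h1, by rw [h2, he]⟩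
    · exact hS s tu htu

theorem fsMergeLoop_nodup :
    ∀ (l : List (Int × PySem.Set (Int × Int))) (sums : PySem.Dict Int (PySem.Set (Int × Int))),
      sums.keys.Nodup → (fsMergeLoop sums l).keys.Nodup := by
  intro l
  induction l with
  | nil => intro sums h; exact h
  | cons hd rest ih =>
    rcases hd with ⟨s1, st1⟩
    intro sums h
    exact ih _ (fsStep_nodup _ _ _ h)

-- outer loop: never returns some false
theorem fsILoop_shape (a : List Int) (n : Int) :
    ∀ (is : List Int) (sums : PySem.Dict Int (PySem.Set (Int × Int))),
      fsILoop a n sums is = none ∨ fsILoop a n sums is = some true := by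
  intro is
  induction is with
  | nil => intro sums; left; rfl
  | cons i is ih =>
    intro sums
    simp only [fsILoop]
    cases hJL : fsJLoop a sums i PySem.Dict.empty (PySem.List.pyRange (i + 1) n 1) with
    | none => right; rfl
    | some out => exact ih _

theorem fsILoop_sound (a : List Int) :
    ∀ (is : List Int) (sums : PySem.Dict Int (PySem.Set (Int × Int))),
      fsSound a sums → sums.keys.Nodup → (∀ i ∈ is, 0 ≤ i) →
      fsILoop a (a.length : Int) sums is = some true → fsW a := by
  intro is
  induction is with
  | nil => intro sums _ _ _ h; exact absurd h (by simp [fsILoop])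
  | cons i is ih =>
    intro sums hS hN hb h
    simp only [fsILoop] at h
    cases hJL : fsJLoop a sums i PySem.Dict.empty (PySem.List.pyRange (i + 1) (a.length : Int) 1) with
    | none =>
      refine fsJLoop_none_sound a sums i hS _ PySem.Dict.empty ?_ hJL
      intro j hj
      rw [PySem.List.mem_pyRange_one] at hj
      exact ⟨hb i List.mem_cons_self, by omega, by omega⟩
    | some out =>
      rw [hJL] at h
      have hEmptySound : fsSound a (PySem.Dict.empty : PySem.Dict Int (PySem.Set (Int × Int))) := by
        intro s tu htu
        rw [PySem.Dict.getD_empty] at htu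
        exact absurd htu (List.not_mem_nil)
      have hOutSound : fsSound a out := by
        refine fsJLoop_sound a sums i _ PySem.Dict.empty out hEmptySound ?_ hJL
        intro j hj
        rw [PySem.List.mem_pyRange_one] at hj
        exact ⟨hb i List.mem_cons_self, by omega, by omega⟩
      have hOutNodup : out.keys.Nodup := fsJLoop_nodup a sums i _ _ out PySem.Dict.nodup_keys_empty hJL
      refine ih (fsMergeLoop sums out.items) ?_ (fsMergeLoop_nodup _ _ hN)
        (fun i' hi' => hb i' (List.mem_cons_of_mem _ hi')) h
      refine fsMergeLoop_sound a _ _ hS ?_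
      intro s st hm tu htu
      have hget : out.get? s = some st := PySem.Dict.get?_of_mem_items out hm hOutNodup
      have : tu ∈ out.getD s PySem.Set.empty := by
        show tu ∈ (out.get? s).getD _
        rw [hget]; exact htu
      exact hOutSound s tu this

theorem fsILoop_complete (a : List Int) :
    ∀ (m : Nat) (i0 : Int) (sums : PySem.Dict Int (PySem.Set (Int × Int))),
      ((a.length : Int) - i0).toNat ≤ m → fsCompl a sums i0 →
      fsILoop a (a.length : Int) sums (PySem.List.pyRange i0 (a.length : Int) 1) = none →
      ∀ p q r j, fsGood a p q → fsGood a r j → p < r → i0 ≤ r →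
        q ≠ r → j ≠ p → j ≠ q → fsSum a p q = fsSum a r j → False := by
  intro m
  induction m with
  | zero =>
    intro i0 sums hm hc h p q r j hg hg' hpr hi0r hqr hjp hjq hsum
    rcases hg' with ⟨h1, h2, h3⟩
    omega
  | succ m ih =>
    intro i0 sums hm hc h p q r j hg hg' hpr hi0r hqr hjp hjq hsum
    by_cases hn : i0 < (a.length : Int)
    · rw [PySem.List.pyRange_one_cons hn] at h
      simp only [fsILoop] at h
      cases hJL : fsJLoop a sums i0 PySem.Dict.empty (PySem.List.pyRange (i0 + 1) (a.length : Int) 1) with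
      | none => rw [hJL] at h; exact absurd h (by simp)
      | some out =>
        rw [hJL] at h
        by_cases hri : r = i0
        · subst hri
          have hrj : r < j := hg'.2.1
          refine fsJLoop_complete a sums r hc ((a.length : Int) - (r + 1)).toNat (r + 1)
            PySem.Dict.empty out le_rfl (by omega) hJL p q j hg (by omega) (by omega)
            hg'.2.2 (by omega) hjp hjq hsum ?_
          exact PySem.Dict.contains_empty _
        · refine ih (i0 + 1) (fsMergeLoop sums out.items) (by omega) ?_ h p q r j hg hg' hpr
            (by omega) hqr hjp hjq hsum
          intro p' q' hg' hlt
          have hpq' : p' < q' := hg'.2.1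
          by_cases hp' : p' < i0
          · exact fsMergeLoop_mono _ _ _ _ (hc p' q' hg' hp')
          · have hp'i0 : p' = i0 := by omega
            subst hp'i0
            have hq'mem : q' ∈ PySem.List.pyRange (p' + 1) (a.length : Int) 1 := by
              rw [PySem.List.mem_pyRange_one]
              exact ⟨by omega, hg'.2.2⟩
            have hmem := fsJLoop_row_compl a sums p' _ PySem.Dict.empty out hJL q' hq'mem
            have : ∃ st, out.get? (fsSum a p' q') = some st ∧ (p', q') ∈ st := by
              revert hmem
              show (p', q') ∈ (out.get? (fsSum a p' q')).getD _ → _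
              cases hso : out.get? (fsSum a p' q') with
              | none => intro hmem; exact absurd hmem (List.not_mem_nil)
              | some st => intro hmem; exact ⟨st, rfl, hmem⟩
            rcases this with ⟨st, hget, hxin⟩
            exact fsMergeLoop_covers _ _ _ _ st (PySem.Dict.mem_items_of_get?_eq_some out hget) hxin
    · rcases hg' with ⟨h1, h2, h3⟩
      omega

theorem fsA_true_iff (a : List Int) : four_sum_fast a = some true ↔ fsW a := by
  constructor
  · intro h
    refine fsILoop_sound a _ PySem.Dict.empty ?_ PySem.Dict.nodup_keys_empty ?_ h
    · intro s tu htu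
      rw [PySem.Dict.getD_empty] at htu
      exact absurd htu (List.not_mem_nil)
    · intro i hi
      rw [PySem.List.mem_pyRange_one] at hi
      omega
  · intro hW
    rcases fsILoop_shape a (a.length : Int) (PySem.List.pyRange 0 (a.length : Int) 1) PySem.Dict.empty
        with hsh | hsh
    · exfalso
      have hcompl : fsCompl a PySem.Dict.empty 0 := by
        intro p q hg hlt
        exact absurd hlt (by have := hg.1; omega)
      have hno := fsILoop_complete a ((a.length : Int) - 0).toNat 0 PySem.Dict.empty le_rfl hcompl hsh
      rcases hW with ⟨p, q, r, s, hg1, hg2, hrp, hrq, hsp, hsq, hsum⟩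
      rcases lt_or_gt_of_ne (Ne.symm hrp) with hpr | hrp'
      · exact hno p q r s hg1 hg2 hpr hg2.1 (Ne.symm hrq) hsp hsq hsum
      · exact hno r s p q hg2 hg1 hrp' hg1.1 hsp (Ne.symm hrq) (Ne.symm hsq) hsum.symm
    · exact hsh
  

theorem fsA_shape (a : List Int) : four_sum_fast a = none ∨ four_sum_fast a = some true :=
  fsILoop_shape a (a.length : Int) _ _


theorem fsB_any_iff (a : List Int) :
    ((PySem.List.pyRange 0 (a.length : Int) 1).any (fun i =>
      (PySem.List.pyRange (i + 1) (a.length : Int) 1).any (fun j =>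
        (PySem.List.pyRange 0 (a.length : Int) 1).any (fun k =>
          (PySem.List.pyRange (k + 1) (a.length : Int) 1).any (fun l =>
            decide (k ≠ i) && decide (k ≠ j) && decide (l ≠ i) && decide (l ≠ j) &&
            decide (PySem.List.pyGetD a i 0 + PySem.List.pyGetD a j 0 =
                    PySem.List.pyGetD a k 0 + PySem.List.pyGetD a l 0)))))) = true ↔ fsW a := by
  simp only [List.any_eq_true, PySem.List.mem_pyRange_one, Bool.and_eq_true, decide_eq_true_iff]
  constructor
  · rintro ⟨i, ⟨hi0, hin⟩, j, ⟨hij, hjn⟩, k, ⟨hk0, hkn⟩, l, ⟨hkl, hln⟩, ⟨⟨⟨⟨hki, hkj⟩, hli⟩, hlj⟩, hsum⟩⟩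
    exact ⟨i, j, k, l, ⟨hi0, by omega, hjn⟩, ⟨hk0, by omega, hln⟩, hki, hkj, hli, hlj, hsum⟩
  · rintro ⟨p, q, r, s, ⟨hp0, hpq, hqn⟩, ⟨hr0, hrs, hsn⟩, hrp, hrq, hsp, hsq, hsum⟩
    exact ⟨p, ⟨hp0, by omega⟩, q, ⟨by omega, hqn⟩, r, ⟨hr0, by omega⟩, s, ⟨by omega, hsn⟩,
      ⟨⟨⟨⟨hrp, hrq⟩, hsp⟩, hsq⟩, hsum⟩⟩

theorem fsB_true_iff (a : List Int) : four_sum_fast_alt a = some true ↔ fsW a := by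
  unfold four_sum_fast_alt
  dsimp only
  split
  · rename_i hC
    simp only [true_iff]
    exact (fsB_any_iff a).1 hC
  · rename_i hC
    constructor
    · intro h; exact absurd h (by simp)
    · intro hW; exact absurd ((fsB_any_iff a).2 hW) hC
  

theorem fsB_shape (a : List Int) : four_sum_fast_alt a = none ∨ four_sum_fast_alt a = some true := by
  unfold four_sum_fast_alt
  dsimp only
  split
  · right; rfl
  · left; rfl


-- ===== VERDICT (by name: the statement is the Claim_ definition above) =====
theorem four_sum_fast_spec : Claim_equal_four_sum_fast := by
  intro a _
  unfold Spec_four_sum_fast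
  rcases fsA_shape a with hA | hA <;> rcases fsB_shape a with hB | hB <;> rw [hA, hB]
  · exact absurd ((fsA_true_iff a).2 ((fsB_true_iff a).1 hB)) (by rw [hA]; simp)
  · exact absurd ((fsB_true_iff a).2 ((fsA_true_iff a).1 hA)) (by rw [hB]; simp)
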